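-- pv_equiv track=rewrite | github.com/devanshgoenka97/jcc | myapp/views.py | encode_base
-- ===== SOURCE A (Python) =====
-- ARR = "0123456789abcdefghijklmnopqrstuvwxyzABCDEFGHIJKLMNOPQRSTUVWXYZ"
--
-- def encode_base(num, array=ARR):
--     if(num==0):
--         return array[0]
--     retarr=[]
--     base = len(array)
--     while num:
--         num, res = divmod(num,base)
--         retarr.append(array[res])
--     retarr.reverse()
--     return ''.join(retarr)[:6]
-- ===== SOURCE B (Python) =====
-- ARR = "0123456789abcdefghijklmnopqrstuvwxyzABCDEFGHIJKLMNOPQRSTUVWXYZ"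
--
-- def encode_base(num, array=ARR):
--     base = len(array)
--     if num == 0:
--         return array[0]
--     n, d = num, 0
--     while n:
--         n //= base
--         d += 1
--     out = []
--     for i in range(min(d, 6)):
--         out.append(array[(num // base ** (d - 1 - i)) % base])
--     return ''.join(out)
-- ===== Notes on version B (the rewrite author's own statement) =====
-- stated objective: alternative
-- what changed: Instead of collecting all least-significant-first digits, reversing and slicing to 6 chars, B first counts the number of base-b digits and then emits only the leading min(d,6) digits directly by div/mod with the right power of the base.
import Mathlib
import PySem

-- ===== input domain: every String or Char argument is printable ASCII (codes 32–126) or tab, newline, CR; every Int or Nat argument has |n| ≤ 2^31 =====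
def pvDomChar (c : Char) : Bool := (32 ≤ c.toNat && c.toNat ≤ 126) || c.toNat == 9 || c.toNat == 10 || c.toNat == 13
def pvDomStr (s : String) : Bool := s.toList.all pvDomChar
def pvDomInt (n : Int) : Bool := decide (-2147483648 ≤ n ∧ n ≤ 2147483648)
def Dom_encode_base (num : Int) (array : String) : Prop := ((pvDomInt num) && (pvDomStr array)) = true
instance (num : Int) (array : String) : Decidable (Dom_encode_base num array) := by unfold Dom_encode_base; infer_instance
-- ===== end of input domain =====

-- B emits the leading min(d,6) base-b digits directly after counting the digits, instead of A's
-- collect-all-digits/reverse/slice; same cost, different decomposition (objective: alternative).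

-- ===== PORT A =====
-- the loop `while num: num, res = divmod(num, base); retarr.append(array[res])`.
-- The fuel argument and the `num < 0 ∨ base < 2` branch are termination guards only: inside Pre_
-- the fuel log2(num)+1 is never exhausted (encLoopA_eq below), and the extra branch returns early
-- exactly where the Python loop never terminates (outside Pre_); no algorithm is switched.
def encLoopA (arr : List Char) (base : Int) : Nat → Int → List Char → List Char
  | 0, _, retarr => retarr
  | fuel + 1, num, retarr =>
    if num = 0 then retarr
    else if num < 0 ∨ base < 2 then retarr
    else encLoopA arr base fuel (PySem.Int.floordiv num base)
           (retarr ++ [PySem.List.pyGetD arr (PySem.Int.mod num base) ' '])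
           -- array[res] with 0 ≤ res < base = len(array): always in range, so pyGetD is exact

def encode_base (num : Int) (array : String) : String :=
  if num = 0 then String.ofList (PySem.Str.pyGet? array 0).toList  -- array[0]; none = IndexError, excluded by Pre_
  else
    let base : Int := PySem.Str.len array
    let retarr := encLoopA array.toList base (num.toNat.log2 + 1) num []
    String.ofList (PySem.List.slice retarr.reverse none (some 6))  -- ''.join(retarr)[:6]

-- ===== PORT B =====
-- the loop `while n: n //= base; d += 1`; same fuel/termination guards, outside Pre_, as in port A.
def countLoopB (base : Int) : Nat → Int → Int → Int
  | 0, _, d => d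
  | fuel + 1, n, d =>
    if n = 0 then d
    else if n < 0 ∨ base < 2 then d
    else countLoopB base fuel (PySem.Int.floordiv n base) (d + 1)

def encode_base_alt (num : Int) (array : String) : String :=
  let base : Int := PySem.Str.len array
  if num = 0 then String.ofList (PySem.Str.pyGet? array 0).toList  -- array[0]
  else
    let d := countLoopB base (num.toNat.log2 + 1) num 0
    -- for i in range(min(d, 6)): out.append(array[(num // base**(d-1-i)) % base])
    -- base ** (d-1-i): the exponent d-1-i is nonnegative for every i in the range, so .toNat is exact
    String.ofList ((PySem.List.pyRange 0 (min d 6) 1).map (fun i =>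
      PySem.List.pyGetD array.toList
        (PySem.Int.mod (PySem.Int.floordiv num (base ^ (d - 1 - i).toNat)) base) ' '))

-- ===== PRECONDITION & SPEC =====
-- Pre_ excludes only inputs on which A does not return: negative num and (with num ≠ 0) a
-- one-character alphabet, where A's while-loop never terminates (divmod(num, 1) = (num, 0)),
-- and the empty alphabet, where A raises IndexError (num = 0) or ZeroDivisionError.
def Pre_encode_base (num : Int) (array : String) : Prop :=
  0 ≤ num ∧ array.toList ≠ [] ∧ (num ≠ 0 → 2 ≤ array.toList.length)
instance (num : Int) (array : String) : Decidable (Pre_encode_base num array) := by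
  unfold Pre_encode_base; infer_instance

def pvWitness_encode_base : Int × String := (12345, "0123456789abcdef")

def Spec_encode_base (num : Int) (array : String) (out : String) : Prop := out = encode_base_alt num array
instance (num : Int) (array : String) (out : String) : Decidable (Spec_encode_base num array out) := by
  unfold Spec_encode_base; infer_instance

-- ===== CLAIM (what is proved, stated in full; the proofs are below) =====
def Claim_equal_encode_base : Prop := ∀ (num : Int) (array : String), Dom_encode_base num array → Pre_encode_base num array → Spec_encode_base num array (encode_base num array)

-- ===== LEMMAS AND PROOFS =====

-- A's loop produces the little-endian base-b digits, each mapped through the alphabet.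
theorem encLoopA_eq (L : List Char) (b : Nat) (hb : 2 ≤ b) :
    ∀ (n f : Nat) (acc : List Char), n < 2 ^ f →
      encLoopA L (b : Int) f (n : Int) acc
        = acc ++ (Nat.digits b n).map (fun k => L.getD k ' ') := by
  intro n
  induction n using Nat.strong_induction_on with
  | _ n ih =>
    intro f acc hf
    match f with
    | 0 =>
      have hn : n = 0 := by simpa using hf
      subst hn; simp [encLoopA]
    | g + 1 =>
      rw [encLoopA]
      by_cases hn : n = 0
      · subst hn; simp
      · have h0 : ¬ ((n : Int) = 0) := by omega
        have h1 : ¬ ((n : Int) < 0 ∨ (b : Int) < 2) := by push_neg; omega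
        rw [if_neg h0, if_neg h1, PySem.Int.floordiv_natCast n b,
            PySem.Int.mod_natCast n b, PySem.List.pyGetD_natCast]
        have hle : n / b ≤ n / 2 := Nat.div_le_div_left hb (by norm_num)
        have hp : 2 ^ (g + 1) = 2 ^ g * 2 := pow_succ 2 g
        have hrec : n / b < 2 ^ g := by omega
        rw [ih (n / b) (Nat.div_lt_self (by omega) (by omega)) g _ hrec,
            Nat.digits_def' (by omega : 1 < b) (by omega : 0 < n)]
        simp

-- B's count loop computes the number of base-b digits.
theorem countLoopB_eq (b : Nat) (hb : 2 ≤ b) :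
    ∀ (n f : Nat) (d : Int), n < 2 ^ f →
      countLoopB (b : Int) f (n : Int) d = d + ((Nat.digits b n).length : Int) := by
  intro n
  induction n using Nat.strong_induction_on with
  | _ n ih =>
    intro f d hf
    match f with
    | 0 =>
      have hn : n = 0 := by simpa using hf
      subst hn; simp [countLoopB]
    | g + 1 =>
      rw [countLoopB]
      by_cases hn : n = 0
      · subst hn; simp
      · have h0 : ¬ ((n : Int) = 0) := by omega
        have h1 : ¬ ((n : Int) < 0 ∨ (b : Int) < 2) := by push_neg; omega
        have hle : n / b ≤ n / 2 := Nat.div_le_div_left hb (by norm_num)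
        have hp : 2 ^ (g + 1) = 2 ^ g * 2 := pow_succ 2 g
        have hrec : n / b < 2 ^ g := by omega
        rw [if_neg h0, if_neg h1, PySem.Int.floordiv_natCast n b,
            ih (n / b) (Nat.div_lt_self (by omega) (by omega)) g _ hrec,
            Nat.digits_def' (by omega : 1 < b) (by omega : 0 < n)]
        simp; omega

-- the leading min(d,6) digits, most significant first, as an extraction by div/mod
theorem reverse_take_digits (b : Nat) (hb : 2 ≤ b) (n : Nat) :
    (Nat.digits b n).reverse.take 6
      = (List.range (min (Nat.digits b n).length 6)).map
          (fun k => n / b ^ ((Nat.digits b n).length - 1 - k) % b) := by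
  apply List.ext_getElem
  · simp [Nat.min_comm]
  · intro i h1 h2
    simp only [List.getElem_take, List.getElem_reverse, List.getElem_map, List.getElem_range]
    rw [← List.getD_eq_getElem _ 0 (by simp at h1 ⊢; omega), Nat.getD_digits _ _ hb]

theorem encode_base_eq_alt (num : Int) (array : String)
    (hpre : Pre_encode_base num array) : encode_base num array = encode_base_alt num array := by
  obtain ⟨hnn, hne, hlen⟩ := hpre
  by_cases h0 : num = 0
  · subst h0; simp [encode_base, encode_base_alt]
  · obtain ⟨n, rfl⟩ : ∃ n : Nat, (n : Int) = num := ⟨num.toNat, by omega⟩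
    have hn : n ≠ 0 := by omega
    have hb : 2 ≤ array.toList.length := hlen h0
    have hfuel : n < 2 ^ (n.log2 + 1) := Nat.lt_log2_self
    simp only [encode_base, encode_base_alt, if_neg h0, PySem.Str.len_eq, Int.toNat_natCast]
    rw [encLoopA_eq array.toList array.toList.length hb n (n.log2 + 1) [] hfuel,
        countLoopB_eq array.toList.length hb n (n.log2 + 1) 0 hfuel]
    set L := array.toList with hL
    set b := L.length with hbdef
    set digs := Nat.digits b n with hdigs
    set dN := digs.length with hdN
    simp only [zero_add, List.nil_append]
    rw [← List.map_reverse, PySem.List.slice_to _ (show (0:Int) ≤ 6 by norm_num)]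
    rw [show ((6:Int)).toNat = 6 from rfl, ← List.map_take, reverse_take_digits b hb n,
        ← hdigs, ← hdN]
    have hmin : min ((dN : Nat) : Int) 6 = ((min dN 6 : Nat) : Int) := by omega
    rw [hmin, PySem.List.pyRange_zero_nat, List.map_map, List.map_map]
    refine congrArg String.ofList ?_
    apply List.map_congr_left
    intro k hk
    simp only [List.mem_range] at hk
    simp only [Function.comp_apply]
    have hexp : ((dN : Int) - 1 - (k : Int)).toNat = dN - 1 - k := by omega
    rw [hexp, ← Nat.cast_pow, PySem.Int.floordiv_natCast, PySem.Int.mod_natCast,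
        PySem.List.pyGetD_natCast]

-- ===== VERDICT (by name: the statement is the Claim_ definition above) =====
theorem encode_base_spec : Claim_equal_encode_base := by
  intro num array _ hpre
  unfold Spec_encode_base
  exact encode_base_eq_alt num array hpre
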